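-- pv_equiv track=rewrite | github.com/SU-3IN025-fev2020/projet-kolkata-team-jong-un | kolkata-restaurant/kalkota_restaurants.py | no_goal_no_wall
-- ===== SOURCE A (Python) =====
-- def no_goal_no_wall(goalStates,wallStates):
--     #calcul toutes les cases non atteignables
--     #prend en argument deux listes, les objectifs et les murs
--     #renvoie une liste
--     allowed = []
--     for i in range(20):
--         for j in range(20):
--             if((i,j) not in wallStates):
--                 if((i,j) not in goalStates):
--                     allowed.append((i,j))
--     return allowed
-- ===== SOURCE B (Python) =====
-- def no_goal_no_wall(goalStates, wallStates):
--     # Simpler: whole-grid set minus walls minus goals, sorted back to (i,j) emission order.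
--     cells = {(i, j) for i in range(20) for j in range(20)}
--     return sorted(cells - set(wallStates) - set(goalStates))
-- ===== Notes on version B (the rewrite author's own statement) =====
-- stated objective: faster
-- what changed: Replaces the 400-iteration nested loop with two linear list-membership scans per cell by one hashed set difference (grid minus walls minus goals) followed by a single sort restoring the (i,j) emission order.
import Mathlib
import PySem

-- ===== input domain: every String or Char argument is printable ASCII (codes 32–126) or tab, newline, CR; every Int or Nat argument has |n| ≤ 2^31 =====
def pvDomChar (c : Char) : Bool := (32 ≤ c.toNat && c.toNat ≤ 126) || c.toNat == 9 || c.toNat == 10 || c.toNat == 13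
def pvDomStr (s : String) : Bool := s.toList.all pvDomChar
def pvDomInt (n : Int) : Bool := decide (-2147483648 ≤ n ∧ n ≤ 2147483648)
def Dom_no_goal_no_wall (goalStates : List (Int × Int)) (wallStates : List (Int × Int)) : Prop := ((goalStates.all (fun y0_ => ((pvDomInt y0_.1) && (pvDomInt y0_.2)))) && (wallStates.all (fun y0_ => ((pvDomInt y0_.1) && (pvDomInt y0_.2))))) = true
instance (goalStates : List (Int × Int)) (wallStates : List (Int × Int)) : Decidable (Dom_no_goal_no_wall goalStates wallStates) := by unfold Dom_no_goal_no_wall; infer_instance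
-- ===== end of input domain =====

-- B replaces A's nested 20x20 loop with two list-membership guards by one set difference
-- (grid \ walls \ goals) followed by a sort; objective: faster (hashed lookups replace per-cell list scans).


-- ===== PORT A =====
def no_goal_no_wall (goalStates : List (Int × Int)) (wallStates : List (Int × Int)) : List (Int × Int) :=
  (PySem.List.pyRange 0 20 1).foldl (fun allowed i =>
    (PySem.List.pyRange 0 20 1).foldl (fun allowed j =>
      if (i, j) ∉ wallStates then
        (if (i, j) ∉ goalStates then allowed ++ [(i, j)] else allowed)
      else allowed) allowed) []

-- ===== PORT B =====
def no_goal_no_wall_alt (goalStates : List (Int × Int)) (wallStates : List (Int × Int)) : List (Int × Int) :=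
  PySem.List.sorted2
    (PySem.Set.diff
      (PySem.Set.diff
        (PySem.Set.ofList ((PySem.List.pyRange 0 20 1).flatMap (fun i =>
          (PySem.List.pyRange 0 20 1).map (fun j => (i, j)))))
        (PySem.Set.ofList wallStates))
      (PySem.Set.ofList goalStates))
    (fun p => p.1) (fun p => p.2)

-- ===== PRECONDITION & SPEC =====
def Spec_no_goal_no_wall (goalStates : List (Int × Int)) (wallStates : List (Int × Int)) (out : List (Int × Int)) : Prop := out = no_goal_no_wall_alt goalStates wallStates
instance (goalStates : List (Int × Int)) (wallStates : List (Int × Int)) (out : List (Int × Int)) : Decidable (Spec_no_goal_no_wall goalStates wallStates out) := by unfold Spec_no_goal_no_wall; infer_instance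

-- ===== CLAIM (what is proved, stated in full; the proofs are below) =====
def Claim_equal_no_goal_no_wall : Prop := ∀ (goalStates : List (Int × Int)) (wallStates : List (Int × Int)), Dom_no_goal_no_wall goalStates wallStates → Spec_no_goal_no_wall goalStates wallStates (no_goal_no_wall goalStates wallStates)

-- ===== LEMMAS AND PROOFS =====

-- the 20×20 grid in A's emission order
def pvGrid : List (Int × Int) :=
  (PySem.List.pyRange 0 20 1).flatMap (fun i => (PySem.List.pyRange 0 20 1).map (fun j => (i, j)))

-- the strict "before" relation sorted2 uses (lexicographic on the pair)
def pvBefore (a b : Int × Int) : Bool :=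
  decide (a.1 < b.1) || (!decide (b.1 < a.1) && decide (a.2 < b.2))

theorem pvBefore_asymm {a b : Int × Int} (h : pvBefore a b = true) : pvBefore b a = false := by
  simp only [pvBefore] at h ⊢
  rcases Bool.or_eq_true_iff.mp h with h1 | h1 <;>
    simp_all <;> omega

theorem pvBefore_ne {a b : Int × Int} (h : pvBefore a b = true) : a ≠ b := by
  intro he; subst he
  simp [pvBefore] at h

-- a list already strictly ordered by pvBefore is its own insertion sort
theorem foldl_insertBy_of_pairwise (ys : List (Int × Int)) :
    ∀ acc : List (Int × Int), (acc ++ ys).Pairwise (fun a b => pvBefore a b = true) →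
      ys.foldl (fun acc x => PySem.List.insertBy pvBefore x acc) acc = acc ++ ys := by
  induction ys with
  | nil => intro acc _; simp
  | cons x t ih =>
    intro acc hp
    have hins : PySem.List.insertBy pvBefore x acc = acc ++ [x] := by
      apply PySem.List.insertBy_of_forall_not_before
      intro y hy
      have : pvBefore y x = true := by
        have := (List.pairwise_append.mp hp).2.2 y hy x (by simp)
        exact this
      simpa using pvBefore_asymm this
    have hp' : ((acc ++ [x]) ++ t).Pairwise (fun a b => pvBefore a b = true) := by
      simpa [List.append_assoc] using hp
    calc (x :: t).foldl (fun acc x => PySem.List.insertBy pvBefore x acc) acc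
        = t.foldl (fun acc x => PySem.List.insertBy pvBefore x acc) (acc ++ [x]) := by
          simp [List.foldl_cons, hins]
      _ = (acc ++ [x]) ++ t := ih (acc ++ [x]) hp'
      _ = acc ++ (x :: t) := by simp

theorem sorted2_eq_self_of_pairwise (ys : List (Int × Int))
    (h : ys.Pairwise (fun a b => pvBefore a b = true)) :
    PySem.List.sorted2 ys (fun p => p.1) (fun p => p.2) = ys := by
  show ys.foldl (fun acc x => PySem.List.insertBy pvBefore x acc) [] = ys
  simpa using foldl_insertBy_of_pairwise ys [] (by simpa using h)

theorem pvGrid_pairwise : pvGrid.Pairwise (fun a b => pvBefore a b = true) := by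
  unfold pvGrid
  rw [List.pairwise_flatMap]
  refine ⟨?_, ?_⟩
  · intro i _
    rw [List.pairwise_map]
    refine List.Pairwise.imp ?_ (show (PySem.List.pyRange 0 20 1).Pairwise (· < ·) by decide)
    intro a b hab
    simp [pvBefore]
    omega
  · refine List.Pairwise.imp ?_ (show (PySem.List.pyRange 0 20 1).Pairwise (· < ·) by decide)
    intro a b hab x hx y hy
    simp only [List.mem_map] at hx hy
    obtain ⟨j1, _, rfl⟩ := hx
    obtain ⟨j2, _, rfl⟩ := hy
    simp [pvBefore]
    omega

theorem pvGrid_nodup : pvGrid.Nodup :=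
  pvGrid_pairwise.imp (fun h => pvBefore_ne h)

-- A computes grid.filter
theorem no_goal_no_wall_eq_filter (goalStates wallStates : List (Int × Int)) :
    no_goal_no_wall goalStates wallStates
      = pvGrid.filter (fun p => decide (p ∉ wallStates) && decide (p ∉ goalStates)) := by
  unfold no_goal_no_wall pvGrid
  have hinner : ∀ (i : Int) (acc : List (Int × Int)),
      (PySem.List.pyRange 0 20 1).foldl (fun allowed j =>
        if (i, j) ∉ wallStates then
          (if (i, j) ∉ goalStates then allowed ++ [(i, j)] else allowed)
        else allowed) acc
      = acc ++ ((PySem.List.pyRange 0 20 1).map (fun j => (i, j))).filter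
          (fun p => decide (p ∉ wallStates) && decide (p ∉ goalStates)) := by
    intro i acc
    have hfun : (fun (allowed : List (Int × Int)) (j : Int) =>
        if (i, j) ∉ wallStates then
          (if (i, j) ∉ goalStates then allowed ++ [(i, j)] else allowed)
        else allowed)
      = (fun allowed j =>
          if (decide ((i, j) ∉ wallStates) && decide ((i, j) ∉ goalStates)) = true
          then allowed ++ [(i, j)] else allowed) := by
      funext allowed j
      by_cases h1 : (i, j) ∈ wallStates <;> by_cases h2 : (i, j) ∈ goalStates <;> simp [h1, h2]
    rw [hfun, PySem.List.foldl_append_if, List.filter_map]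
    rfl
  have houter : ∀ (is : List Int) (acc : List (Int × Int)),
      is.foldl (fun allowed i =>
        (PySem.List.pyRange 0 20 1).foldl (fun allowed j =>
          if (i, j) ∉ wallStates then
            (if (i, j) ∉ goalStates then allowed ++ [(i, j)] else allowed)
          else allowed) allowed) acc
      = acc ++ is.flatMap (fun i => ((PySem.List.pyRange 0 20 1).map (fun j => (i, j))).filter
          (fun p => decide (p ∉ wallStates) && decide (p ∉ goalStates))) := by
    intro is
    have : (fun (allowed : List (Int × Int)) (i : Int) =>
        (PySem.List.pyRange 0 20 1).foldl (fun allowed j =>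
          if (i, j) ∉ wallStates then
            (if (i, j) ∉ goalStates then allowed ++ [(i, j)] else allowed)
          else allowed) allowed)
      = (fun allowed i => allowed ++ ((PySem.List.pyRange 0 20 1).map (fun j => (i, j))).filter
          (fun p => decide (p ∉ wallStates) && decide (p ∉ goalStates))) := by
      funext allowed i; exact hinner i allowed
    intro acc
    rw [this, PySem.List.foldl_append_eq_flatMap]
  rw [houter, List.nil_append, ← List.filter_flatMap]

-- B computes sorted2 of the same filter
theorem no_goal_no_wall_alt_eq (goalStates wallStates : List (Int × Int)) :
    no_goal_no_wall_alt goalStates wallStates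
      = PySem.List.sorted2
          (pvGrid.filter (fun p => decide (p ∉ wallStates) && decide (p ∉ goalStates)))
          (fun p => p.1) (fun p => p.2) := by
  show PySem.List.sorted2
      (PySem.Set.diff (PySem.Set.diff (PySem.Set.ofList pvGrid) (PySem.Set.ofList wallStates))
        (PySem.Set.ofList goalStates)) (fun p => p.1) (fun p => p.2) = _
  rw [show PySem.Set.ofList pvGrid = pvGrid from
        PySem.Set.ofList_eq_self_of_nodup pvGrid pvGrid_nodup]
  unfold PySem.Set.diff
  rw [List.filter_filter]
  congr 1
  apply List.filter_congr
  intro p _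
  by_cases h1 : p ∈ wallStates <;> by_cases h2 : p ∈ goalStates <;>
    simp [PySem.Set.contains, PySem.Set.mem_ofList, h1, h2]

-- ===== VERDICT (by name: the statement is the Claim_ definition above) =====
theorem no_goal_no_wall_spec : Claim_equal_no_goal_no_wall := by
  intro goalStates wallStates _
  unfold Spec_no_goal_no_wall
  rw [no_goal_no_wall_eq_filter, no_goal_no_wall_alt_eq]
  rw [sorted2_eq_self_of_pairwise]
  exact List.Pairwise.sublist List.filter_sublist pvGrid_pairwise
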